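-- pv_equiv track=rewrite | github.com/jurajvandor/PV248-python | 08-csv/student.py | dict_of_values
-- ===== SOURCE A (Python) =====
-- def column_name(column, type):
--     if type == "dates":
--         return column[:-3]
--     if type == "exercises":
--         return column[-2:]
--
-- def dict_of_values(stud, type):
--     dict_values = dict()
--     for key in stud.keys():
--         if column_name(key, type) not in dict_values.keys():
--             dict_values[column_name(key, type)] = stud[key]
--         else:
--             dict_values[column_name(key, type)] = dict_values.get(column_name(key, type)) + stud[key]
--     return dict_values
-- ===== SOURCE B (Python) =====
-- def column_name(column, type):
--     if type == "dates":
--         return column[:-3]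
--     if type == "exercises":
--         return column[-2:]
--
-- def dict_of_values(stud, type):
--     # group-then-reduce: first collect each key's value under its derived
--     # column name (insertion order preserved), then sum each group.
--     groups = {}
--     for key in stud.keys():
--         groups.setdefault(column_name(key, type), []).append(stud[key])
--     return {name: sum(vals) for name, vals in groups.items()}
-- ===== Notes on version B (the rewrite author's own statement) =====
-- stated objective: alternative
-- what changed: A accumulates running totals in one pass with an if/else on key presence; B first groups the values into lists keyed by the derived column name and then sums each group in a second pass.
-- outside the precondition, e.g. on dict_of_values({'ab': 1}, 'x'): A returns {None: 1}, B returns {None: 1}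
import Mathlib
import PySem

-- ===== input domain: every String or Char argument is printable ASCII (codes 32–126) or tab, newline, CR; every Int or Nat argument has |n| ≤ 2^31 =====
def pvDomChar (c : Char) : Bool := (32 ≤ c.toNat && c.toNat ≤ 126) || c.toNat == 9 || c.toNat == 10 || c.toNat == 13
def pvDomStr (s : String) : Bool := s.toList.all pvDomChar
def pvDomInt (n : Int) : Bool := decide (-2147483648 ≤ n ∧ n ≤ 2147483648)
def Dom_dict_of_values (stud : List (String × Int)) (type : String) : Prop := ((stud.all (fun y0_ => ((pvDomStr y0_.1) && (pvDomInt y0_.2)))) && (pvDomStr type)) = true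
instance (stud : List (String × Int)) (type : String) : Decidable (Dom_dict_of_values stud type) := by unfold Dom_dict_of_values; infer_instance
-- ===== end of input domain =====

-- B restates A's single-pass if/else accumulation as group-then-reduce (collect value lists per derived name, then sum each list); alternative decomposition, same cost.

-- ===== PORT A =====
-- shared module helper column_name; on a type other than "dates"/"exercises" Python
-- returns None (not a str) — those inputs are outside Pre_, the "" branch is unreachable there
def pvColumnName (column type : String) : String :=
  if type == "dates" then PySem.Str.slice column none (some (-3))
  else if type == "exercises" then PySem.Str.slice column (some (-2)) none
  else ""

def dict_of_values (stud : List (String × Int)) (type : String) : List (String × Int) :=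
  let d : PySem.Dict String Int := ⟨stud⟩
  let dict_values : PySem.Dict String Int :=
    d.keys.foldl (fun dv key =>
      if dv.contains (pvColumnName key type) = false then
        dv.insert (pvColumnName key type) (d.getD key 0)        -- stud[key]; key ∈ keys, default unreachable
      else
        dv.insert (pvColumnName key type) (dv.getD (pvColumnName key type) 0 + d.getD key 0))
      PySem.Dict.empty
  dict_values.items

-- ===== PORT B =====
def dict_of_values_alt (stud : List (String × Int)) (type : String) : List (String × Int) :=
  let d : PySem.Dict String Int := ⟨stud⟩
  -- groups.setdefault(name, []).append(v)  ==  modify name [] (· ++ [v])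
  let groups : PySem.Dict String (List Int) :=
    d.keys.foldl (fun g key =>
      g.modify (pvColumnName key type) [] (· ++ [d.getD key 0])) PySem.Dict.empty
  -- {name: sum(vals) for name, vals in groups.items()}
  (groups.items.foldl (fun out p => out.insert p.1 p.2.sum) PySem.Dict.empty).items

-- ===== PRECONDITION & SPEC =====
-- Pre_ excludes a nonempty stud with type not in {"dates","exercises"}: there A returns a
-- dict keyed by None — not a value of the declared type dict[str, int].
def Pre_dict_of_values (stud : List (String × Int)) (type : String) : Prop :=
  stud = [] ∨ type = "dates" ∨ type = "exercises"
instance (stud : List (String × Int)) (type : String) : Decidable (Pre_dict_of_values stud type) := by unfold Pre_dict_of_values; infer_instance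

def pvWitness_dict_of_values : (List (String × Int)) × String := ([("hw01", 5), ("hw02", 3), ("ex01", 7)], "exercises")

def Spec_dict_of_values (stud : List (String × Int)) (type : String) (out : List (String × Int)) : Prop := out = dict_of_values_alt stud type
instance (stud : List (String × Int)) (type : String) (out : List (String × Int)) : Decidable (Spec_dict_of_values stud type out) := by unfold Spec_dict_of_values; infer_instance

-- ===== CLAIM (what is proved, stated in full; the proofs are below) =====
def Claim_equal_dict_of_values : Prop := ∀ (stud : List (String × Int)) (type : String), Dom_dict_of_values stud type → Pre_dict_of_values stud type → Spec_dict_of_values stud type (dict_of_values stud type)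

-- ===== LEMMAS AND PROOFS =====

-- A's running total at a name equals the sum of B's value list at that name.
lemma pvGetD_sum (g : PySem.Dict String (List Int)) (acc : PySem.Dict String Int) (m : String)
    (hR : acc.items = g.items.map (fun p => (p.1, p.2.sum))) :
    acc.getD m 0 = (g.getD m []).sum := by
  have hfind : acc.items.find? (fun p => p.1 == m)
      = (g.items.find? (fun p => p.1 == m)).map (fun p => (p.1, p.2.sum)) := by
    rw [hR, List.find?_map]
    rfl
  simp only [PySem.Dict.getD, PySem.Dict.get?, hfind]
  cases g.items.find? (fun p => p.1 == m) <;> simp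

lemma pvContains_eq (g : PySem.Dict String (List Int)) (acc : PySem.Dict String Int) (m : String)
    (hR : acc.items = g.items.map (fun p => (p.1, p.2.sum))) :
    acc.contains m = g.contains m := by
  simp only [PySem.Dict.contains, hR, List.any_map]
  rfl

-- one step of A's accumulation corresponds to one step of B's grouping
lemma pvStep (m : String) (w : Int) (g : PySem.Dict String (List Int)) (acc : PySem.Dict String Int)
    (hR : acc.items = g.items.map (fun p => (p.1, p.2.sum))) :
    (if acc.contains m = false then acc.insert m w
     else acc.insert m (acc.getD m 0 + w)).items
    = (g.modify m [] (· ++ [w])).items.map (fun p => (p.1, p.2.sum)) := by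
  have hc := pvContains_eq g acc m hR
  have hs := pvGetD_sum g acc m hR
  by_cases h : g.contains m = true
  · have hacc : acc.contains m = true := by rw [hc]; exact h
    rw [if_neg (by simp [hacc])]
    show (acc.insert m (acc.getD m 0 + w)).items
      = ((g.insert m (g.getD m [] ++ [w])).items).map (fun p => (p.1, p.2.sum))
    simp only [PySem.Dict.insert, hacc, h, if_true, hR, List.map_map]
    apply List.map_congr_left
    intro p _
    by_cases hp : (p.1 == m) = true <;>
      simp [Function.comp, hp, hs, List.sum_append]
  · have h' : g.contains m = false := by simpa using h
    simp only [PySem.Dict.modify, PySem.Dict.insert, hc, h', hR]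
    have : g.getD m [] = [] := by
      simp only [PySem.Dict.getD, PySem.Dict.get?]
      have : g.items.find? (fun p => p.1 == m) = none := by
        rw [List.find?_eq_none]
        intro p hp
        by_contra hb
        have : g.contains m = true := by
          simp only [PySem.Dict.contains, List.any_eq_true]
          exact ⟨p, hp, by simpa using hb⟩
        simp [this] at h'
      simp [this]
    simp [this]

-- main invariant: A's fold tracks the per-name sums of B's grouping fold
lemma pvMain (n : String → String) (v : String → Int) :
    ∀ (keys : List String) (g : PySem.Dict String (List Int)) (acc : PySem.Dict String Int),
    acc.items = g.items.map (fun p => (p.1, p.2.sum)) →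
    (keys.foldl (fun dv key =>
        if dv.contains (n key) = false then dv.insert (n key) (v key)
        else dv.insert (n key) (dv.getD (n key) 0 + v key)) acc).items
    = ((keys.foldl (fun g key => g.modify (n key) [] (· ++ [v key])) g).items).map
        (fun p => (p.1, p.2.sum)) := by
  intro keys
  induction keys with
  | nil => intro g acc hR; simpa using hR
  | cons k ks ih =>
    intro g acc hR
    simp only [List.foldl_cons]
    exact ih _ _ (pvStep (n k) (v k) g acc hR)

-- ===== VERDICT (by name: the statement is the Claim_ definition above) =====
theorem dict_of_values_spec : Claim_equal_dict_of_values := by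
  intro stud type _ _
  unfold Spec_dict_of_values dict_of_values dict_of_values_alt
  set d : PySem.Dict String Int := ⟨stud⟩ with hd
  set groups : PySem.Dict String (List Int) :=
    d.keys.foldl (fun g key =>
      g.modify (pvColumnName key type) [] (· ++ [d.getD key 0])) PySem.Dict.empty with hg
  have hnodup : groups.keys.Nodup := by
    rw [hg]
    exact PySem.Dict.nodup_keys_foldl_modify_key d.keys (fun key => pvColumnName key type) []
      (fun _ key => (· ++ [d.getD key 0])) PySem.Dict.empty (by simp [PySem.Dict.empty, PySem.Dict.keys])
  have hfresh : (groups.items.foldl (fun out p => out.insert p.1 p.2.sum) PySem.Dict.empty).items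
      = groups.items.map (fun p => (p.1, p.2.sum)) := by
    have := PySem.Dict.items_foldl_insert_fresh groups.items Prod.fst (fun p => p.2.sum)
      PySem.Dict.empty (by intro a _; simp [PySem.Dict.empty, PySem.Dict.contains])
      (by simpa [PySem.Dict.keys] using hnodup)
    simpa [PySem.Dict.empty] using this
  rw [hfresh]
  exact pvMain (fun key => pvColumnName key type) (fun key => d.getD key 0) d.keys
    PySem.Dict.empty PySem.Dict.empty (by simp [PySem.Dict.empty])
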